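-- pv_equiv track=rewrite | github.com/brownfox2k6/Codeforces-solutions | CodeForces/PyPy 3-64/1461B | Find the Spruce/219882007.py | check
-- ===== SOURCE A (Python) =====
-- def check(asti, l, r):
--     low = 0
--     high = len(asti) - 1
--     while low <= high:
--         mid = (low + high) >> 1
--         # If [l, r] completely inside asti[mid] -> ok
--         if l >= asti[mid][0] and r <= asti[mid][1]:
--             return True
--         # If [l, r] partially inside asti[mid] -> not ok
--         if asti[mid][0] <= l <= asti[mid][1] or asti[mid][0] <= r <= asti[mid][1]:
--             return False
--         # If [l, r] completely outside asti[mid]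
--         if l > asti[mid][1]:
--             low = mid + 1
--         else:
--             high = mid - 1
--     return False
-- ===== SOURCE B (Python) =====
-- def check(asti, l, r):
--     # Same binary search, decomposed as classify + divide-and-conquer recursion.
--     def classify(seg):
--         a, b = seg
--         if a <= l and r <= b:
--             return 'inside'
--         if a <= l <= b or a <= r <= b:
--             return 'overlap'
--         return 'right' if l > b else 'left'
--
--     def go(low, high):
--         if low > high:
--             return False
--         mid = (low + high) // 2
--         c = classify(asti[mid])
--         if c == 'inside':
--             return True
--         if c == 'overlap':
--             return False
--         if c == 'right':
--             return go(mid + 1, high)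
--         return go(low, mid - 1)
--
--     return go(0, len(asti) - 1)
-- ===== Notes on version B (the rewrite author's own statement) =====
-- stated objective: alternative
-- what changed: The iterative while-loop binary search is decomposed into a classify helper (inside/partial/left/right for one interval) plus a divide-and-conquer recursion on the low/high bounds, replacing the loop with recursion and the inline comparison chain with a four-way classification.
import Mathlib
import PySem

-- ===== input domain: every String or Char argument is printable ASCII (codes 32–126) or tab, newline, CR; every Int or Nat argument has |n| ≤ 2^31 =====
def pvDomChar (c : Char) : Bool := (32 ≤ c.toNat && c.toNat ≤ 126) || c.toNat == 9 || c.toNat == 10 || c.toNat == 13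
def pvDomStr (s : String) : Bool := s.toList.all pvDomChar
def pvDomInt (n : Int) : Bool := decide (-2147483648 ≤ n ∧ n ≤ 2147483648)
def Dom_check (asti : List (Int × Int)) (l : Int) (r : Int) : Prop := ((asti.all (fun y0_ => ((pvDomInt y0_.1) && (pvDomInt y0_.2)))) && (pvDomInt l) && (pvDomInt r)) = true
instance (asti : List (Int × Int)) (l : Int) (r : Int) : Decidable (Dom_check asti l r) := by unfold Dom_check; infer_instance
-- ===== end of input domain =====

-- B decomposes A's while-loop binary search into a classify helper plus a
-- divide-and-conquer recursion on the bounds; same decisions, same result (objective: alternative).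

-- ===== PORT A =====
-- the while-loop as a tail recursion on the loop state (low, high); the loop runs at
-- most (high+1-low) ≤ len times, so fuel = len+1 never runs out (a totality guard only);
-- Python's '(low + high) >> 1' is '>>> 1' (floor shift); asti[mid] is always in range
-- here (0 ≤ low ≤ mid ≤ high < len), so pyGetD's default is never used.
def checkLoopA (asti : List (Int × Int)) (l r low high : Int) (fuel : Nat) : Bool :=
  match fuel with
  | 0 => false
  | fuel + 1 =>
    if low ≤ high then
      let mid := (low + high) >>> (1 : Nat)
      if l ≥ (PySem.List.pyGetD asti mid (0, 0)).1 && r ≤ (PySem.List.pyGetD asti mid (0, 0)).2 then true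
      else if ((PySem.List.pyGetD asti mid (0, 0)).1 ≤ l && l ≤ (PySem.List.pyGetD asti mid (0, 0)).2)
           || ((PySem.List.pyGetD asti mid (0, 0)).1 ≤ r && r ≤ (PySem.List.pyGetD asti mid (0, 0)).2) then false
      else if l > (PySem.List.pyGetD asti mid (0, 0)).2 then checkLoopA asti l r (mid + 1) high fuel
      else checkLoopA asti l r low (mid - 1) fuel
    else false

def check (asti : List (Int × Int)) (l : Int) (r : Int) : Bool :=
  checkLoopA asti l r 0 ((asti.length : Int) - 1) (asti.length + 1)

-- ===== PORT B =====
inductive PvRel where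
  | inside | overlap | left | right
  deriving DecidableEq, Repr

def pvClassify (l r : Int) (seg : Int × Int) : PvRel :=
  if seg.1 ≤ l ∧ r ≤ seg.2 then PvRel.inside
  else if (seg.1 ≤ l ∧ l ≤ seg.2) ∨ (seg.1 ≤ r ∧ r ≤ seg.2) then PvRel.overlap
  else if l > seg.2 then PvRel.right else PvRel.left

-- recursion depth is at most the range size ≤ len, so fuel = len+1 never runs out
def pvGo (asti : List (Int × Int)) (l r low high : Int) (fuel : Nat) : Bool :=
  match fuel with
  | 0 => false
  | fuel + 1 =>
    if low > high then false
    else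
      let mid := PySem.Int.floordiv (low + high) 2
      match pvClassify l r (PySem.List.pyGetD asti mid (0, 0)) with
      | PvRel.inside => true
      | PvRel.overlap => false
      | PvRel.right => pvGo asti l r (mid + 1) high fuel
      | PvRel.left => pvGo asti l r low (mid - 1) fuel

def check_alt (asti : List (Int × Int)) (l : Int) (r : Int) : Bool :=
  pvGo asti l r 0 ((asti.length : Int) - 1) (asti.length + 1)

-- ===== PRECONDITION & SPEC =====
def Spec_check (asti : List (Int × Int)) (l : Int) (r : Int) (out : Bool) : Prop := out = check_alt asti l r
instance (asti : List (Int × Int)) (l : Int) (r : Int) (out : Bool) : Decidable (Spec_check asti l r out) := by unfold Spec_check; infer_instance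

-- ===== CLAIM (what is proved, stated in full; the proofs are below) =====
def Claim_equal_check : Prop := ∀ (asti : List (Int × Int)) (l : Int) (r : Int), Dom_check asti l r → Spec_check asti l r (check asti l r)

-- ===== LEMMAS AND PROOFS =====
theorem pvShiftMid (n : Int) : n >>> (1 : Nat) = PySem.Int.floordiv n 2 := by
  simp [PySem.Int.floordiv, Int.shiftRight_eq_div_pow, Int.fdiv_eq_ediv]

theorem loop_eq_go (asti : List (Int × Int)) (l r : Int) :
    ∀ (fuel : Nat) (low high : Int),
      checkLoopA asti l r low high fuel = pvGo asti l r low high fuel := by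
  intro fuel
  induction fuel with
  | zero => intro low high; rfl
  | succ n ih =>
    intro low high
    rw [checkLoopA, pvGo]
    by_cases hlh : low ≤ high
    · rw [if_pos hlh, if_neg (by omega : ¬ low > high),
          show PySem.Int.floordiv (low + high) 2 = (low + high) >>> (1 : Nat) from (pvShiftMid _).symm]
      unfold pvClassify
      simp only [ge_iff_le, Bool.and_eq_true, Bool.or_eq_true, decide_eq_true_eq]
      split_ifs <;> first | rfl | exact ih _ _
    · rw [if_neg hlh, if_pos (by omega : low > high)]

-- ===== VERDICT (by name: the statement is the Claim_ definition above) =====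
theorem check_spec : Claim_equal_check := by
  intro asti l r _
  unfold Spec_check check check_alt
  exact loop_eq_go asti l r _ 0 _
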